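-- pv_equiv track=rewrite | github.com/AleRodriguezCruz/tareas_automata | src/Evaluador.py | es_cadena
-- ===== SOURCE A (Python) =====
-- def es_cadena(tokens):
--     stack = []
--     for token in tokens:
--         if token == 34:  # comillas dobles
--             if stack and stack[-1] == 34:
--                 stack.pop()
--             else:
--                 stack.append(token)
--     return not stack
-- ===== SOURCE B (Python) =====
-- def es_cadena(tokens):
--     return tokens.count(34) % 2 == 0
-- ===== Notes on version B (the rewrite author's own statement) =====
-- stated objective: idiomatic
-- what changed: A's one-element stack with a conditional pop/append branch is replaced by a single library call: the result is just the parity of tokens.count(34), with no explicit loop or stack at all.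
import Mathlib
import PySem

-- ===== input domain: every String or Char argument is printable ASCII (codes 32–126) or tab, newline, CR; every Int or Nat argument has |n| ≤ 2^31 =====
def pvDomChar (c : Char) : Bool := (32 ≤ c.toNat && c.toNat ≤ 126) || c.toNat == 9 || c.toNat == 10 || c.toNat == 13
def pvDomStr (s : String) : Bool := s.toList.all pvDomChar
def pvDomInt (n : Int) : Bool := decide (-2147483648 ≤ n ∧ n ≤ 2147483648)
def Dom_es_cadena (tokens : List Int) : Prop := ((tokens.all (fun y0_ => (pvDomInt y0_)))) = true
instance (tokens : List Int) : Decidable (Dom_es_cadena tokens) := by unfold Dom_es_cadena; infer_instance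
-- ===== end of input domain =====

-- B replaces A's stack loop by the idiomatic one-liner tokens.count(34) % 2 == 0: no explicit loop, no stack, no branch.

-- ===== PORT A =====
-- loop over tokens maintaining the stack; Python's `not stack` = stack.isEmpty
def es_cadena_loop (stack : List Int) (tokens : List Int) : List Int :=
  match tokens with
  | [] => stack
  | token :: rest =>
      if token == 34 then
        if !stack.isEmpty && stack.getLast! == 34 then
          es_cadena_loop (stack.dropLast) rest
        else
          es_cadena_loop (stack ++ [token]) rest
      else
        es_cadena_loop stack rest

def es_cadena (tokens : List Int) : Bool :=
  (es_cadena_loop [] tokens).isEmpty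

-- ===== PORT B =====
-- Source B: return tokens.count(34) % 2 == 0   (list.count → PySem.List.count, % → PySem.Int.mod)
def es_cadena_alt (tokens : List Int) : Bool :=
  PySem.Int.mod ((PySem.List.count tokens 34 : Nat) : Int) 2 == 0

-- ===== PRECONDITION & SPEC =====
def Spec_es_cadena (tokens : List Int) (out : Bool) : Prop := out = es_cadena_alt tokens
instance (tokens : List Int) (out : Bool) : Decidable (Spec_es_cadena tokens out) := by unfold Spec_es_cadena; infer_instance

-- ===== CLAIM =====
def Claim_equal_es_cadena : Prop := ∀ (tokens : List Int), Dom_es_cadena tokens → Spec_es_cadena tokens (es_cadena tokens)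

-- ===== LEMMAS AND PROOFS =====
theorem loop_empty (tokens : List Int) :
    (es_cadena_loop [] tokens = [] ↔ Even (tokens.count 34)) ∧
    (es_cadena_loop [34] tokens = [] ↔ ¬ Even (tokens.count 34)) := by
  induction tokens with
  | nil => simp [es_cadena_loop]
  | cons t rest ih =>
      by_cases h : t = 34
      · subst h
        constructor
        · simp only [es_cadena_loop]
          simp [List.count_cons, Nat.even_add_one, ih.2]
        · simp only [es_cadena_loop]
          simp [List.count_cons, Nat.even_add_one, ih.1, List.getLast!, List.dropLast]
      · constructor
        · simp only [es_cadena_loop]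
          simp [show ¬ (t == (34:Int)) = true by simpa using h, List.count_cons, h, ih.1]
        · simp only [es_cadena_loop]
          simp [show ¬ (t == (34:Int)) = true by simpa using h, List.count_cons, h, ih.2]

-- ===== VERDICT =====
theorem es_cadena_spec : Claim_equal_es_cadena := by
  intro tokens _
  unfold Spec_es_cadena es_cadena es_cadena_alt
  rw [PySem.Int.mod_eq_emod_of_pos (a := ((PySem.List.count tokens 34 : Nat) : Int)) (b := 2) (by omega)]
  have hc : PySem.List.count tokens 34 = tokens.count 34 := PySem.List.count_eq tokens 34
  by_cases he : Even (tokens.count 34)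
  · have h1 : es_cadena_loop [] tokens = [] := (loop_empty tokens).1.2 he
    rcases he with ⟨k, hk⟩
    simp [h1, hc, hk]
    omega
  · have h1 : es_cadena_loop [] tokens ≠ [] := fun hl => he ((loop_empty tokens).1.1 hl)
    have h3 : (es_cadena_loop [] tokens).isEmpty = false := by
      simpa [List.isEmpty_iff] using h1
    rw [Nat.not_even_iff_odd] at he
    rcases he with ⟨k, hk⟩
    rw [h3]
    symm
    rw [beq_eq_false_iff_ne]
    rw [hc, hk]
    omega
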